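-- pv_equiv track=rewrite | github.com/yesjjin99/Python-study | Yejin/Programmers/Heap/더맵게.py | solution
-- ===== SOURCE A (Python) =====
-- import heapq
--
-- def solution(scoville, K):
--     heapq.heapify(scoville)
--     answer = 0
--
--     while scoville[0] < K:
--         num = heapq.heappop(scoville) + (heapq.heappop(scoville) * 2)
--               # scoville[0] + (scoville[1] * 2)
--         heapq.heappush(scoville, num)
--         answer += 1
--
--         if scoville[0] < K and len(scoville) == 1:
--             return -1
--
--     return answer
-- ===== SOURCE B (Python) =====
-- import bisect
--
-- def solution(scoville, K):
--     # Return-value equivalent to A; A heapifies `scoville` in place while B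
--     # leaves the argument untouched (works on a sorted copy).
--     s = sorted(scoville)
--     answer = 0
--     while s[0] < K:
--         if len(s) == 1:
--             return -1
--         a = s.pop(0)
--         b = s.pop(0)
--         bisect.insort(s, a + b * 2)
--         answer += 1
--     return answer
-- ===== Notes on version B (the rewrite author's own statement) =====
-- stated objective: simpler
-- what changed: Replaces A's binary heap (heapq heapify/heappop/heappush) by a single upfront sort plus a maintained-sorted list: pop the two smallest from the front and re-insert the mix with bisect.insort.
-- outside the precondition, e.g. on solution([1], 7): A raises IndexError, B returns -1; on solution([], 5): A raises IndexError, B raises IndexError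
-- crash fix: On a one-element list below K, A raises IndexError (second heappop on an empty heap) while B returns -1, the conventional 'impossible' answer. — e.g. on solution([1], 7): A raises IndexError, B returns -1
import Mathlib
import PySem

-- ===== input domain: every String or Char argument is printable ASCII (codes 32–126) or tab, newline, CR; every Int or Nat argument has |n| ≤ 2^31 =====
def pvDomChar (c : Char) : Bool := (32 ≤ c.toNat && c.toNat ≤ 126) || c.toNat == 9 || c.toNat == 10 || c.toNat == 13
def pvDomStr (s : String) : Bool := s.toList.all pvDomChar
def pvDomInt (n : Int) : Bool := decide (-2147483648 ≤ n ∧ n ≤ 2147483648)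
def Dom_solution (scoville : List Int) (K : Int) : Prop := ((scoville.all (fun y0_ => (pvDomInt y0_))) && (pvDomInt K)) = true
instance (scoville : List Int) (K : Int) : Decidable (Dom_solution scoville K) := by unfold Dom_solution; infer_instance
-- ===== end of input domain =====

-- B replaces A's binary heap (heapq) by a once-sorted list maintained with
-- bisect.insort; return values agree on Pre_ (A mutates `scoville` in place —
-- heapifies it — while B works on a sorted copy; equivalence is about the
-- return value only).

-- ===== PORT A =====
-- A uses heapq; the heap primitives below are a step-for-step transliteration
-- of CPython's pure-Python reference implementation of heapq
-- (_siftdown, _siftup, heappush, heappop, heapify).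
-- Indexing inside the heap primitives is always in range at every call site,
-- so `hget` (getD with default 0) is exact there.

def hget (h : List Int) (i : Nat) : Int := h.getD i 0

-- CPython _siftdown's while loop; x is `newitem`, the final write heap[pos] = newitem
-- is the `set pos x`.  The extra `fuel` argument only makes the recursion structural:
-- the loop walks up the parent chain, so `fuel = pos` steps always suffice.
def siftdownAux (s : Nat) : List Int → Nat → Int → Nat → List Int
  | h, pos, x, fuel + 1 =>
    if s < pos then
      let pp := (pos - 1) / 2
      let p := hget h pp
      if x < p then siftdownAux s (h.set pos p) pp x fuel
      else h.set pos x
    else h.set pos x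
  | h, pos, x, 0 => h.set pos x

-- _siftdown(heap, startpos, pos): newitem = heap[pos], then the loop.
def pysiftdown (h : List Int) (s pos : Nat) : List Int :=
  siftdownAux s h pos (hget h pos) pos

-- _siftup's "move the smaller child up" while loop; returns the final heap and pos.
-- `fuel` again only bounds the recursion (`endp - cp` steps always suffice).
def siftupAux (endp : Nat) : List Int → Nat → Nat → Nat → List Int × Nat
  | h, pos, cp, fuel + 1 =>
    if cp < endp then
      let c := if cp + 1 < endp ∧ ¬ (hget h cp < hget h (cp + 1)) then cp + 1 else cp
      siftupAux endp (h.set pos (hget h c)) c (2 * c + 1) fuel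
    else (h, pos)
  | h, pos, cp, 0 => (h, pos)

-- _siftup(heap, pos): save newitem, bubble the hole to a leaf, write newitem
-- there, then _siftdown back towards the start position.
def pysiftup (h : List Int) (pos : Nat) : List Int :=
  let x := hget h pos
  let r := siftupAux h.length h pos (2 * pos + 1) h.length
  pysiftdown (r.1.set r.2 x) pos r.2

-- heappush: append, then _siftdown(heap, 0, len(heap)-1)
def pyheappush (h : List Int) (x : Int) : List Int :=
  pysiftdown (h ++ [x]) 0 h.length

-- heappop: lastelt = heap.pop() (none = IndexError on []); if the heap is now
-- empty return lastelt, else return heap[0], put lastelt at the root and _siftup.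
def pyheappop (h : List Int) : Option (Int × List Int) :=
  match h.getLast? with
  | none => none
  | some lastelt =>
    let rest := h.dropLast
    if rest.isEmpty then some (lastelt, rest)
    else some (hget rest 0, pysiftup (rest.set 0 lastelt) 0)

-- heapify: for i in reversed(range(n//2)): _siftup(x, i)
def pyheapify (x : List Int) : List Int :=
  (List.range (x.length / 2)).reverse.foldl (fun h i => pysiftup h i) x

-- the while loop of A (none = the IndexError paths of scoville[0] / heappop);
-- `fuel` only makes the recursion structural: each mix shrinks the heap by one
-- element, so `fuel = length of the heap` steps always suffice.
def loopA : Nat → List Int → Int → Int → Option Int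
  | _, [], _, _ => none
  | fuel + 1, h0 :: ht, K, ans =>
    if h0 < K then
      match pyheappop (h0 :: ht) with
      | none => none
      | some (a, h1) =>
        match pyheappop h1 with
        | none => none
        | some (b, h2) =>
          let h3 := pyheappush h2 (a + b * 2)
          match h3 with
          | [] => none
          | g0 :: _ =>
            if g0 < K ∧ h3.length = 1 then some (-1)
            else loopA fuel h3 K (ans + 1)
    else some ans
  | 0, _ :: _, _, _ => none

def solution (scoville : List Int) (K : Int) : Int :=
  (loopA (pyheapify scoville).length (pyheapify scoville) K 0).getD 0

-- ===== PORT B =====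
-- bisect.insort(s, v)
def insortB (s : List Int) (v : Int) : List Int :=
  PySem.List.insert s ((PySem.List.bisectRight s v : Nat) : Int) v

-- B's while loop over the maintained-sorted list (none = IndexError of s[0] on []);
-- `fuel` only makes the recursion structural (one element fewer per iteration).
def loopB : Nat → List Int → Int → Int → Option Int
  | _, [], _, _ => none
  | fuel + 1, a :: t, K, ans =>
    if a < K then
      if (a :: t).length = 1 then some (-1)
      else
        match t with
        | [] => none
        | b :: rest => loopB fuel (insortB rest (a + b * 2)) K (ans + 1)
    else some ans
  | 0, _ :: _, _, _ => none

def solution_alt (scoville : List Int) (K : Int) : Int :=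
  (loopB (PySem.List.sorted scoville (fun x => x) false).length
    (PySem.List.sorted scoville (fun x => x) false) K 0).getD 0

-- ===== PRECONDITION & SPEC =====
-- Pre_ excludes exactly the IndexError inputs: the empty list (scoville[0]
-- raises) and a single-element list below K (the second heappop raises).
def Pre_solution (scoville : List Int) (K : Int) : Prop :=
  scoville ≠ [] ∧ (scoville.length = 1 → K ≤ scoville.getD 0 0)
instance (scoville : List Int) (K : Int) : Decidable (Pre_solution scoville K) := by
  unfold Pre_solution; infer_instance

def pvWitness_solution : List Int × Int := ([1, 2, 3, 9, 10, 12], 7)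

-- On a one-element list below K, A raises IndexError (second heappop on an
-- empty heap) while B returns -1, the conventional "impossible" answer.
def Raises_solution (scoville : List Int) (K : Int) : Prop :=
  scoville.length = 1 ∧ scoville.getD 0 0 < K
instance (scoville : List Int) (K : Int) : Decidable (Raises_solution scoville K) := by
  unfold Raises_solution; infer_instance
def pvRaiseWitness_solution : List Int × Int := ([1], 7)
def pvRaiseWitnessOut_solution : Int := -1

def Spec_solution (scoville : List Int) (K : Int) (out : Int) : Prop :=
  out = solution_alt scoville K
instance (scoville : List Int) (K : Int) (out : Int) : Decidable (Spec_solution scoville K out) := by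
  unfold Spec_solution; infer_instance

-- ===== CLAIM (what is proved, stated in full; the proofs are below) =====
def Claim_equal_solution : Prop := ∀ (scoville : List Int) (K : Int),
  Dom_solution scoville K → Pre_solution scoville K →
    Spec_solution scoville K (solution scoville K)

def Claim_raises_solution : Prop :=
  (∀ (scoville : List Int) (K : Int), Dom_solution scoville K →
      Raises_solution scoville K → ¬ Pre_solution scoville K) ∧
  (Dom_solution (pvRaiseWitness_solution.1) (pvRaiseWitness_solution.2) ∧
   Raises_solution (pvRaiseWitness_solution.1) (pvRaiseWitness_solution.2) ∧
   solution_alt (pvRaiseWitness_solution.1) (pvRaiseWitness_solution.2) = pvRaiseWitnessOut_solution)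

-- ===== LEMMAS AND PROOFS =====

-- length facts about the heap primitives
theorem siftdownAux_length (s : Nat) (h : List Int) (pos : Nat) (x : Int) (fuel : Nat) :
    (siftdownAux s h pos x fuel).length = h.length := by
  fun_induction siftdownAux s h pos x fuel <;> simp_all

theorem siftupAux_length (endp : Nat) (h : List Int) (pos cp fuel : Nat) :
    (siftupAux endp h pos cp fuel).1.length = h.length := by
  fun_induction siftupAux endp h pos cp fuel <;> simp_all

theorem pysiftup_length (h : List Int) (pos : Nat) :
    (pysiftup h pos).length = h.length := by
  simp [pysiftup, pysiftdown, siftdownAux_length, siftupAux_length]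

theorem pyheappop_length (h : List Int) (r : Int × List Int)
    (hr : pyheappop h = some r) : r.2.length + 1 = h.length := by
  unfold pyheappop at hr
  match hl : h.getLast? with
  | none => rw [hl] at hr; simp at hr
  | some lastelt =>
    rw [hl] at hr
    have hne : h ≠ [] := by intro he; subst he; simp at hl
    have hlen : h.dropLast.length = h.length - 1 := by simp
    have hpos : 0 < h.length := List.length_pos_iff.mpr hne
    by_cases hemp : h.dropLast.isEmpty
    · simp only [hemp, if_true] at hr
      cases hr
      simp only [List.isEmpty_iff] at hemp
      simp [hemp] at hlen ⊢
      omega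
    · simp only [hemp, if_false] at hr
      cases hr
      simp [pysiftup_length, hlen]
      omega

theorem pyheappush_length (h : List Int) (x : Int) :
    (pyheappush h x).length = h.length + 1 := by
  simp [pyheappush, pysiftdown, siftdownAux_length]


-- parent/child geometry of the implicit binary tree
def ChildOf (i j : Nat) : Prop := j = 2 * i + 1 ∨ j = 2 * i + 2

theorem childOf_parent (j : Nat) (hj : 1 ≤ j) : ChildOf ((j - 1) / 2) j := by
  unfold ChildOf; omega

theorem childOf_eq_parent {i j : Nat} (hc : ChildOf i j) : i = (j - 1) / 2 := by
  unfold ChildOf at hc; omega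

theorem childOf_lt {i j : Nat} (hc : ChildOf i j) : i < j := by
  unfold ChildOf at hc; omega

-- "s is an ancestor (or self) of j": follow parents from j down to s
def anc (s j : Nat) : Bool :=
  if j ≤ s then j == s else anc s ((j - 1) / 2)
termination_by j
decreasing_by exact Nat.lt_of_le_of_lt (Nat.div_le_self _ _) (by omega)

theorem anc_self (s : Nat) : anc s s = true := by
  unfold anc; simp

theorem anc_le {s j : Nat} (h : anc s j = true) : s ≤ j := by
  by_contra hlt
  unfold anc at h
  rw [if_pos (by omega)] at h
  simp at h; omega

theorem anc_step {s j : Nat} (h : s < j) : anc s j = anc s ((j - 1) / 2) := by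
  conv_lhs => unfold anc
  rw [if_neg (by omega)]

theorem anc_zero (j : Nat) : anc 0 j = true := by
  induction j using Nat.strong_induction_on with
  | _ j ih =>
    by_cases h : j = 0
    · subst h; exact anc_self 0
    · rw [anc_step (by omega)]
      exact ih _ (Nat.lt_of_le_of_lt (Nat.div_le_self _ _) (by omega))

theorem anc_child {s i j : Nat} (hi : anc s i = true) (hc : ChildOf i j) : anc s j = true := by
  have hij := childOf_lt hc
  have hsi := anc_le hi
  rw [anc_step (by omega), ← childOf_eq_parent hc]
  exact hi

-- hget / set arithmetic
theorem hget_set_self {h : List Int} {k : Nat} (hk : k < h.length) (v : Int) :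
    hget (h.set k v) k = v := by
  simp [hget, List.getD_eq_getElem?_getD, hk]

theorem hget_set_ne {h : List Int} {a k : Nat} (hne : a ≠ k) (v : Int) :
    hget (h.set a v) k = hget h k := by
  simp [hget, List.getD_eq_getElem?_getD, List.getElem?_set_ne hne]

theorem hget_eq_getElem {h : List Int} {k : Nat} (hk : k < h.length) : hget h k = h[k] := by
  simp [hget, List.getD_eq_getElem, hk]


-- ---------- siftdownAux ----------

theorem siftdownAux_perm (h : List Int) (s pos : Nat) (x : Int) (fuel : Nat)
    (hpos : pos < h.length) :
    (siftdownAux s h pos x fuel).Perm (h.set pos x) := by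
  fun_induction siftdownAux s h pos x fuel with
  | case4 h pos x => exact List.Perm.refl _
  | case1 h pos x fuel hs pp p hx ih =>
    have hppdef : pp = (pos - 1) / 2 := rfl
    have hpplt : pp < pos := by omega
    have hpp : pp < h.length := by omega
    refine (ih (by simp; omega)).trans ?_
    have hpn : p = h[pp] := by
      show hget h pp = h[pp]
      exact hget_eq_getElem hpp
    have key := List.set_set_perm (as := h.set pos x) (i := pos) (j := pp)
      (by simpa using hpos) (by simpa using hpp)
    simp only [List.getElem_set, (show ¬ pos = pp by omega), List.set_set, reduceIte] at key
    rw [hpn]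
    exact key
  | case2 h pos x fuel hs pp p hx => exact List.Perm.refl _
  | case3 h pos x fuel hs => exact List.Perm.refl _

theorem siftdownAux_outside (h : List Int) (s pos : Nat) (x : Int) (fuel : Nat)
    (hanc : anc s pos = true) :
    ∀ k, anc s k = false → hget (siftdownAux s h pos x fuel) k = hget h k := by
  fun_induction siftdownAux s h pos x fuel with
  | case4 h pos x =>
    intro k hk
    have hkpos : pos ≠ k := by rintro rfl; rw [hanc] at hk; cases hk
    exact hget_set_ne hkpos _
  | case1 h pos x fuel hs pp p hx ih =>
    intro k hk
    have hppdef : pp = (pos - 1) / 2 := rfl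
    have hancpp : anc s pp = true := by rw [anc_step hs] at hanc; exact hanc
    have hkpos : pos ≠ k := by rintro rfl; rw [hanc] at hk; cases hk
    rw [ih hancpp k hk, hget_set_ne hkpos]
  | case2 h pos x fuel hs pp p hx =>
    intro k hk
    have hkpos : pos ≠ k := by rintro rfl; rw [hanc] at hk; cases hk
    exact hget_set_ne hkpos _
  | case3 h pos x fuel hs =>
    intro k hk
    have hkpos : pos ≠ k := by rintro rfl; rw [hanc] at hk; cases hk
    exact hget_set_ne hkpos _

theorem siftdownAux_heap (h : List Int) (s pos : Nat) (x : Int) (fuel : Nat)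
    (hfuel : pos ≤ fuel) (hpos : pos < h.length) (hanc : anc s pos = true)
    (H3 : ∀ i j, ChildOf i j → j < h.length → anc s i = true → i ≠ pos → j ≠ pos → j ≠ s →
      hget h i ≤ hget h j)
    (H4 : ∀ j, ChildOf pos j → j < h.length → x ≤ hget h j)
    (H5 : s < pos → ∀ j, ChildOf pos j → j < h.length → hget h ((pos - 1) / 2) ≤ hget h j) :
    ∀ i j, ChildOf i j → j < h.length → anc s i = true → j ≠ s →
      hget (siftdownAux s h pos x fuel) i ≤ hget (siftdownAux s h pos x fuel) j := by
  fun_induction siftdownAux s h pos x fuel with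
  | case4 h pos x =>
    -- fuel 0: pos = 0, and with anc s pos this forces pos = s
    intro i j hc hj hai hjs
    have hposs : pos = s := by
      have h1 := anc_le hanc
      omega
    subst hposs
    have hij := childOf_lt hc
    by_cases hipos : i = pos
    · subst hipos
      rw [hget_set_self hpos, hget_set_ne (by omega)]
      exact H4 j hc hj
    · rw [hget_set_ne (by omega), hget_set_ne (by omega)]
      exact H3 i j hc hj hai hipos (by omega) hjs
  | case1 h pos x fuel hs pp p hx ih =>
    have hppdef : pp = (pos - 1) / 2 := rfl
    have hpplt : pp < pos := by omega
    have hpp : pp < h.length := by omega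
    have hancpp : anc s pp = true := by rw [anc_step hs] at hanc; exact hanc
    have hspp : s ≤ pp := anc_le hancpp
    have hpdef : p = hget h pp := rfl
    have hH3 : ∀ i j, ChildOf i j → j < (h.set pos p).length → anc s i = true → i ≠ pp →
        j ≠ pp → j ≠ s → hget (h.set pos p) i ≤ hget (h.set pos p) j := by
      intro i j hc hj hai hipp hjpp hjs
      simp only [List.length_set] at hj
      have hij := childOf_lt hc
      have hipar := childOf_eq_parent hc
      by_cases hjpos : j = pos
      · exact absurd (by omega : i = pp) hipp
      · by_cases hipos : i = pos
        · subst hipos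
          rw [hget_set_self hpos, hget_set_ne (by omega)]
          exact hpdef ▸ H5 hs j hc hj
        · rw [hget_set_ne (by omega), hget_set_ne (by omega)]
          exact H3 i j hc hj hai hipos hjpos hjs
    have hH4 : ∀ j, ChildOf pp j → j < (h.set pos p).length → x ≤ hget (h.set pos p) j := by
      intro j hc hj
      simp only [List.length_set] at hj
      have hjge : pp < j := childOf_lt hc
      by_cases hjpos : j = pos
      · subst hjpos; rw [hget_set_self hpos]; exact le_of_lt hx
      · rw [hget_set_ne (by omega)]
        refine le_trans (le_of_lt hx) ?_
        rw [hpdef]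
        exact H3 pp j hc hj hancpp (by omega) hjpos (by omega)
    have hH5 : s < pp → ∀ j, ChildOf pp j → j < (h.set pos p).length →
        hget (h.set pos p) ((pp - 1) / 2) ≤ hget (h.set pos p) j := by
      intro hspplt j hc hj
      simp only [List.length_set] at hj
      have hpp1 : 1 ≤ pp := by omega
      have hcpp : ChildOf ((pp - 1) / 2) pp := childOf_parent pp hpp1
      have hanc2 : anc s ((pp - 1) / 2) = true := by
        rw [anc_step hspplt] at hancpp; exact hancpp
      have hpa_lt : (pp - 1) / 2 < pp := by omega
      have hbase : hget h ((pp - 1) / 2) ≤ hget h pp :=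
        H3 _ pp hcpp hpp hanc2 (by omega) (by omega) (by omega)
      have hjgt : pp < j := childOf_lt hc
      rw [hget_set_ne (show pos ≠ (pp - 1) / 2 by omega)]
      by_cases hjpos : j = pos
      · subst hjpos
        rw [hget_set_self hpos, hpdef]
        exact hbase
      · rw [hget_set_ne (by omega)]
        refine le_trans hbase (H3 pp j hc hj hancpp (by omega) hjpos (by omega))
    intro i j hc hj hai hjs
    exact ih (by omega) (by simpa using hpp) hancpp hH3 hH4 hH5 i j hc (by simpa using hj) hai hjs
  | case2 h pos x fuel hs pp p hx =>
    intro i j hc hj hai hjs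
    have hij := childOf_lt hc
    by_cases hjpos : j = pos
    · have hipp : i = pp := by
        have := childOf_eq_parent hc
        subst hjpos; exact this
      rw [hipp, hget_set_ne (show pos ≠ pp by omega), hjpos, hget_set_self hpos]
      exact le_of_not_gt hx
    · by_cases hipos : i = pos
      · subst hipos
        rw [hget_set_self hpos, hget_set_ne (by omega)]
        exact H4 j hc hj
      · rw [hget_set_ne (by omega), hget_set_ne (by omega)]
        exact H3 i j hc hj hai hipos hjpos hjs
  | case3 h pos x fuel hs =>
    intro i j hc hj hai hjs
    have hposs : pos = s := le_antisymm (le_of_not_gt hs) (anc_le hanc)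
    subst hposs
    have hij := childOf_lt hc
    by_cases hipos : i = pos
    · subst hipos
      rw [hget_set_self hpos, hget_set_ne (by omega)]
      exact H4 j hc hj
    · rw [hget_set_ne (by omega), hget_set_ne (by omega)]
      exact H3 i j hc hj hai hipos (by omega) hjs

-- ---------- siftupAux / pysiftup ----------

theorem siftupAux_snd_lt (endp : Nat) (h : List Int) (pos cp fuel : Nat) (hpos : pos < endp) :
    (siftupAux endp h pos cp fuel).2 < endp := by
  fun_induction siftupAux endp h pos cp fuel with
  | case1 h pos cp fuel hlt c ih =>
    apply ih
    simp only [c]; split <;> omega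
  | case2 => simpa
  | case3 => simpa

theorem siftupAux_spec (h : List Int) (s pos cp endp fuel : Nat)
    (hfuel : endp - cp ≤ fuel)
    (hlen : h.length = endp) (hcp : cp = 2 * pos + 1) (hpos : pos < endp)
    (hanc : anc s pos = true)
    (hD2 : ∀ i j, ChildOf i j → j < endp → anc s i = true → i ≠ pos → j ≠ s → j ≠ pos →
      hget h i ≤ hget h j)
    (hD3 : s < pos → ∀ j, ChildOf pos j → j < endp →
      hget h ((pos - 1) / 2) ≤ hget h j) :
    (∀ y, ((siftupAux endp h pos cp fuel).1.set (siftupAux endp h pos cp fuel).2 y).Perm (h.set pos y)) ∧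
    (siftupAux endp h pos cp fuel).1.length = endp ∧
    anc s (siftupAux endp h pos cp fuel).2 = true ∧
    (∀ j, ChildOf (siftupAux endp h pos cp fuel).2 j → ¬ j < endp) ∧
    (∀ i j, ChildOf i j → j < endp → anc s i = true → i ≠ (siftupAux endp h pos cp fuel).2 →
      j ≠ s → j ≠ (siftupAux endp h pos cp fuel).2 →
      hget (siftupAux endp h pos cp fuel).1 i ≤ hget (siftupAux endp h pos cp fuel).1 j) ∧
    (∀ k, anc s k = false → hget (siftupAux endp h pos cp fuel).1 k = hget h k) := by
  fun_induction siftupAux endp h pos cp fuel with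
  | case3 h pos cp =>
    -- fuel 0: endp ≤ cp, so pos is already a leaf
    refine ⟨fun y => List.Perm.refl _, hlen, hanc, ?_, ?_, fun k _ => rfl⟩
    · intro j hcj
      unfold ChildOf at hcj
      omega
    · intro i j hc2 hj hai hip hjs hjp
      exact hD2 i j hc2 hj hai hip hjs hjp
  | case1 h pos cp fuel hlt c ih =>
    have hcdef : c = if cp + 1 < endp ∧ ¬ (hget h cp < hget h (cp + 1)) then cp + 1 else cp := rfl
    have hcc : c = cp ∨ c = cp + 1 := by rw [hcdef]; split <;> omega
    have hcend : c < endp := by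
      rw [hcdef]; split
      · rename_i hcond; exact hcond.1
      · exact hlt
    have hchild : ChildOf pos c := by unfold ChildOf; omega
    have hposc : pos < c := by omega
    have hanc_c : anc s c = true := anc_child hanc hchild
    have hsc : s < c := by have := anc_le hanc; omega
    -- the chosen child is the smaller of the two
    have hsmall : ∀ j, ChildOf pos j → j < endp → j ≠ c → hget h c ≤ hget h j := by
      intro j hcj hj hjc
      have hjval : j = cp ∨ j = cp + 1 := by unfold ChildOf at hcj; omega
      have hcval : c = cp ∨ c = cp + 1 := hcc
      rw [hcdef]
      split
      · rename_i hcond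
        have hjcp : j = cp := by
          rcases hjval with rfl | rfl
          · rfl
          · exfalso; apply hjc; rw [hcdef, if_pos hcond]
        subst hjcp
        have := hcond.2
        omega
      · rename_i hcond
        have hjcp : j = cp + 1 := by
          rcases hjval with rfl | rfl
          · exfalso; apply hjc; rw [hcdef, if_neg hcond]
          · rfl
        subst hjcp
        have hlt2 : hget h cp < hget h (cp + 1) := by
          by_contra hno
          exact hcond ⟨by omega, hno⟩
        omega
    have hlen' : (h.set pos (hget h c)).length = endp := by simpa using hlen
    have hposlen : pos < h.length := by omega
    have hclen : c < h.length := by omega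
    -- premises of the induction hypothesis
    have hD2' : ∀ i j, ChildOf i j → j < endp → anc s i = true → i ≠ c → j ≠ s → j ≠ c →
        hget (h.set pos (hget h c)) i ≤ hget (h.set pos (hget h c)) j := by
      intro i j hc2 hj hai hic hjs hjc
      have hij := childOf_lt hc2
      have hipar := childOf_eq_parent hc2
      by_cases hjpos : j = pos
      · -- i is the parent of pos; pos now holds h[c]
        have hspos : s < pos := by
          rcases Nat.eq_or_lt_of_le (anc_le hanc) with heq | hlt2
          · exact absurd (hjpos.trans heq.symm) hjs
          · exact hlt2
        rw [hget_set_ne (show pos ≠ i by omega), hjpos, hget_set_self hposlen]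
        have hgoal := hD3 hspos c hchild hcend
        rw [hipar, hjpos]
        exact hgoal
      · by_cases hipos : i = pos
        · subst hipos
          rw [hget_set_self hposlen, hget_set_ne (by omega)]
          exact hsmall j hc2 hj hjc
        · rw [hget_set_ne (by omega), hget_set_ne (by omega)]
          exact hD2 i j hc2 hj hai hipos hjs hjpos
    have hD3' : s < c → ∀ j, ChildOf c j → j < endp →
        hget (h.set pos (hget h c)) ((c - 1) / 2) ≤ hget (h.set pos (hget h c)) j := by
      intro _ j hcj hj
      have hpar : (c - 1) / 2 = pos := by unfold ChildOf at hchild; omega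
      have hjgt : c < j := childOf_lt hcj
      rw [hpar, hget_set_self hposlen, hget_set_ne (by omega)]
      exact hD2 c j hcj hj hanc_c (by omega) (by omega) (by omega)
    obtain ⟨C1, C2, C3, C4, C5, C6⟩ := ih (by omega) hlen' rfl hcend hanc_c hD2' hD3'
    refine ⟨?_, C2, C3, C4, C5, ?_⟩
    · intro y
      refine (C1 y).trans ?_
      have key := List.set_set_perm (as := h.set pos y) (i := pos) (j := c)
        (by simpa using hposlen) (by simpa using hclen)
      simp only [List.getElem_set, (show ¬ pos = c by omega), List.set_set, reduceIte] at key
      have : hget h c = h[c] := hget_eq_getElem hclen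
      rw [this]
      exact key
    · intro k hk
      have hkpos : pos ≠ k := by rintro rfl; rw [hanc] at hk; cases hk
      rw [C6 k hk, hget_set_ne hkpos]
  | case2 h pos cp fuel hlt =>
    refine ⟨fun y => List.Perm.refl _, hlen, hanc, ?_, ?_, fun k _ => rfl⟩
    · intro j hcj
      unfold ChildOf at hcj
      omega
    · intro i j hc2 hj hai hip hjs hjp
      exact hD2 i j hc2 hj hai hip hjs hjp

theorem pysiftup_spec (h : List Int) (s : Nat) (hs : s < h.length)
    (hH : ∀ i j, ChildOf i j → j < h.length → anc s i = true → i ≠ s →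
      hget h i ≤ hget h j) :
    (pysiftup h s).Perm h ∧
    (∀ k, anc s k = false → hget (pysiftup h s) k = hget h k) ∧
    (∀ i j, ChildOf i j → j < h.length → anc s i = true → j ≠ s →
      hget (pysiftup h s) i ≤ hget (pysiftup h s) j) := by
  obtain ⟨C1, C2, C3, C4, C5, C6⟩ := siftupAux_spec h s s (2 * s + 1) h.length h.length
    (by omega) rfl rfl hs
    (anc_self s) (fun i j a b c d e _ => hH i j a b c d) (fun hcon => absurd hcon (lt_irrefl s))
  set r := siftupAux h.length h s (2 * s + 1) h.length with hr
  have hrpos : r.2 < h.length := by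
    have := siftupAux_snd_lt h.length h s (2 * s + 1) h.length hs
    rwa [← hr] at this
  have hrlen : r.1.length = h.length := C2
  set x := hget h s with hx
  have hlen_set : (r.1.set r.2 x).length = h.length := by simp [hrlen]
  have hread : hget (r.1.set r.2 x) r.2 = x := hget_set_self (by omega) x
  have hsu : pysiftup h s =
      siftdownAux s (r.1.set r.2 x) r.2 (hget (r.1.set r.2 x) r.2) r.2 := rfl
  rw [hread] at hsu
  rw [hsu]
  have hperm0 : (r.1.set r.2 x).Perm (h.set s x) := C1 x
  have hsd_perm : (siftdownAux s (r.1.set r.2 x) r.2 x r.2).Perm ((r.1.set r.2 x).set r.2 x) :=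
    siftdownAux_perm _ s r.2 x r.2 (by omega)
  have hcollapse : (r.1.set r.2 x).set r.2 x = r.1.set r.2 x := List.set_set x
  have hback : h.set s x = h := by
    rw [hx, hget_eq_getElem hs]
    exact List.set_getElem_self hs
  have hperm : (siftdownAux s (r.1.set r.2 x) r.2 x r.2).Perm h := by
    rw [hcollapse] at hsd_perm
    rw [← hback]
    exact hsd_perm.trans hperm0
  refine ⟨hperm, ?_, ?_⟩
  · intro k hk
    have hkr : r.2 ≠ k := by rintro rfl; rw [C3] at hk; cases hk
    rw [siftdownAux_outside _ s r.2 x r.2 C3 k hk, hget_set_ne hkr, C6 k hk]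
  · intro i j hc hj hai hjs
    refine siftdownAux_heap (r.1.set r.2 x) s r.2 x r.2 (le_refl _) (by omega) C3 ?_ ?_ ?_ i j hc
      (by omega) hai hjs
    · intro i' j' hc' hj' hai' hir hjr hjs'
      rw [hget_set_ne (by omega), hget_set_ne (by omega)]
      exact C5 i' j' hc' (by omega) hai' hir hjs' hjr
    · intro j' hc' hj'
      exact absurd (by omega : j' < h.length) (C4 j' hc')
    · intro _ j' hc' hj'
      exact absurd (by omega : j' < h.length) (C4 j' hc')

-- ---------- heap predicate and the three heapq operations ----------

def Ish (h : List Int) : Prop :=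
  ∀ i j, ChildOf i j → j < h.length → hget h i ≤ hget h j

theorem root_min {h : List Int} (hh : Ish h) : ∀ j, j < h.length → hget h 0 ≤ hget h j := by
  intro j
  induction j using Nat.strong_induction_on with
  | _ j ih =>
    intro hj
    by_cases h0 : j = 0
    · subst h0; exact le_refl _
    · have hc := childOf_parent j (by omega)
      have hpa : (j - 1) / 2 < j := Nat.lt_of_le_of_lt (Nat.div_le_self _ _) (by omega)
      exact le_trans (ih _ hpa (by omega)) (hh _ _ hc hj)

theorem root_min_mem {h : List Int} (hh : Ish h) : ∀ y ∈ h, hget h 0 ≤ y := by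
  intro y hy
  obtain ⟨j, hj, rfl⟩ := List.getElem_of_mem hy
  have := root_min hh j hj
  simpa [hget, List.getD_eq_getElem, hj] using this

theorem hget_dropLast {h : List Int} {k : Nat} (hk : k < h.dropLast.length) :
    hget h.dropLast k = hget h k := by
  rw [hget_eq_getElem hk, hget_eq_getElem (by simp at hk ⊢; omega), List.getElem_dropLast]

theorem pyheappop_spec (h : List Int) (hh : Ish h) (hne : h ≠ []) :
    ∃ h', pyheappop h = some (hget h 0, h') ∧ Ish h' ∧ h'.Perm h.tail := by
  have hlast : h.getLast? = some (h.getLast hne) := List.getLast?_eq_some_getLast hne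
  set L := h.getLast hne with hL
  by_cases hemp : h.dropLast.isEmpty
  · -- a one-element heap
    have hsing : h = [L] := by
      have h1 : h.dropLast = [] := List.isEmpty_iff.mp hemp
      have := List.dropLast_append_getLast hne
      rw [h1] at this
      simpa [hL] using this.symm
    refine ⟨h.dropLast, ?_, ?_, ?_⟩
    · unfold pyheappop
      rw [hlast]
      simp only [hemp, if_true]
      rw [hsing]
      simp [hget]
    · intro i j hc hj
      rw [List.isEmpty_iff.mp hemp] at hj
      simp at hj
    · rw [List.isEmpty_iff.mp hemp, hsing]
      simp
  · -- at least two elements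
    have hrest_ne : h.dropLast ≠ [] := fun hcon => hemp (by simp [hcon])
    have hrlen : 0 < h.dropLast.length := List.length_pos_iff.mpr hrest_ne
    have hrlen2 : h.dropLast.length + 1 = h.length := by
      have := List.length_pos_iff.mpr hne
      simp [List.length_dropLast]
      omega
    refine ⟨pysiftup (h.dropLast.set 0 L) 0, ?_, ?_, ?_⟩
    · unfold pyheappop
      rw [hlast]
      simp only [hemp, if_false]
      rw [hget_dropLast hrlen]
      simp
    · -- heap property of the result
      have hspec := pysiftup_spec (h.dropLast.set 0 L) 0 (by simpa using hrlen) ?_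
      · intro i j hc hj
        have hj1 : 1 ≤ j := by unfold ChildOf at hc; omega
        have hlen_eq : (pysiftup (h.dropLast.set 0 L) 0).length = (h.dropLast.set 0 L).length :=
          hspec.1.length_eq
        exact hspec.2.2 i j hc (by omega) (anc_zero i) (by omega)
      · intro i j hc hj hai hi0
        have hi1 : 1 ≤ i := Nat.one_le_iff_ne_zero.mpr hi0
        have hj1 : i < j := childOf_lt hc
        simp only [List.length_set] at hj
        rw [hget_set_ne (by omega), hget_set_ne (by omega),
          hget_dropLast (by omega), hget_dropLast (by omega)]
        exact hh i j hc (by omega)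
    · -- permutation with the tail
      have hspec := pysiftup_spec (h.dropLast.set 0 L) 0 (by simpa using hrlen) ?_
      · cases h with
        | nil => exact absurd rfl hne
        | cons h0 t =>
          have ht_ne : t ≠ [] := by
            intro hcon
            subst hcon
            simp at hrest_ne
          have hdl : (h0 :: t).dropLast = h0 :: t.dropLast := by
            cases t with
            | nil => exact absurd rfl ht_ne
            | cons u v => rfl
          have hLt : L = t.getLast ht_ne := by
            rw [hL]
            exact List.getLast_cons ht_ne ▸ rfl
          have hset : (h0 :: t).dropLast.set 0 L = L :: t.dropLast := by
            rw [hdl]; rfl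
          have htdecomp : t.dropLast ++ [L] = t := by
            rw [hLt]
            exact List.dropLast_append_getLast ht_ne
          refine hspec.1.trans ?_
          rw [hset]
          show (L :: t.dropLast).Perm (h0 :: t).tail
          have : (t.dropLast ++ [L]).Perm (L :: t.dropLast) := List.perm_append_singleton L _
          simpa [htdecomp] using this.symm
      · intro i j hc hj hai hi0
        have hi1 : 1 ≤ i := Nat.one_le_iff_ne_zero.mpr hi0
        have hj1 : i < j := childOf_lt hc
        simp only [List.length_set] at hj
        rw [hget_set_ne (by omega), hget_set_ne (by omega),
          hget_dropLast (by omega), hget_dropLast (by omega)]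
        exact hh i j hc (by omega)

theorem hget_append_self (h : List Int) (x : Int) : hget (h ++ [x]) h.length = x := by
  rw [hget_eq_getElem (by simp)]
  simp

theorem hget_append_lt {h : List Int} {k : Nat} (x : Int) (hk : k < h.length) :
    hget (h ++ [x]) k = hget h k := by
  unfold hget
  exact List.getD_append h [x] 0 k hk

theorem pyheappush_spec (h : List Int) (x : Int) (hh : Ish h) :
    Ish (pyheappush h x) ∧ (pyheappush h x).Perm (x :: h) := by
  have hxval : hget (h ++ [x]) h.length = x := hget_append_self h x
  have hpush : pyheappush h x = siftdownAux 0 (h ++ [x]) h.length x h.length := by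
    unfold pyheappush pysiftdown
    rw [hxval]
  have hlen : h.length < (h ++ [x]).length := by simp
  have hheap := siftdownAux_heap (h ++ [x]) 0 h.length x h.length (le_refl _) hlen
    (anc_zero _) ?_ ?_ ?_
  · constructor
    · intro i j hc hj
      rw [hpush] at hj ⊢
      rw [siftdownAux_length] at hj
      have hj1 : 1 ≤ j := by unfold ChildOf at hc; omega
      exact hheap i j hc hj (anc_zero i) (by omega)
    · rw [hpush]
      have hp := siftdownAux_perm (h ++ [x]) 0 h.length x h.length hlen
      have hself : (h ++ [x]).set h.length x = h ++ [x] := by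
        have hb : h.length < (h ++ [x]).length := by simp
        have hx2 : (h ++ [x])[h.length]'hb = x := by
          rw [List.getElem_append_right (by omega)]
          simp
        have hss := List.set_getElem_self hb
        rw [hx2] at hss
        exact hss
      rw [hself] at hp
      exact hp.trans (List.perm_append_singleton x h)
  · intro i j hc hj hai hip hjp hj0
    have hij := childOf_lt hc
    have hjlt : j < h.length := by simp at hj; omega
    rw [hget_append_lt x (by omega), hget_append_lt x hjlt]
    exact hh i j hc hjlt
  · intro j hc hj
    unfold ChildOf at hc
    simp at hj
    omega
  · intro hpos j hc hj
    unfold ChildOf at hc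
    simp at hj
    omega

theorem heapify_aux : ∀ (k : Nat) (h : List Int), k ≤ h.length →
    (∀ i j, ChildOf i j → j < h.length → k ≤ i → hget h i ≤ hget h j) →
    ((List.range k).reverse.foldl (fun h i => pysiftup h i) h).Perm h ∧
    Ish ((List.range k).reverse.foldl (fun h i => pysiftup h i) h) := by
  intro k
  induction k with
  | zero =>
    intro h _ H
    simp only [List.range_zero, List.reverse_nil, List.foldl_nil]
    exact ⟨List.Perm.refl _, fun i j hc hj => H i j hc hj (Nat.zero_le _)⟩
  | succ k ih =>
    intro h hk H
    rw [List.range_succ, List.reverse_append]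
    simp only [List.reverse_cons, List.reverse_nil, List.nil_append, List.singleton_append,
      List.foldl_cons]
    have hklt : k < h.length := by omega
    have hspec := pysiftup_spec h k hklt ?_
    · obtain ⟨hperm1, houtside, hheap1⟩ := hspec
      have hlen1 : (pysiftup h k).length = h.length := hperm1.length_eq
      have H' : ∀ i j, ChildOf i j → j < (pysiftup h k).length → k ≤ i →
          hget (pysiftup h k) i ≤ hget (pysiftup h k) j := by
        intro i j hc hj hki
        rw [hlen1] at hj
        by_cases hai : anc k i = true
        · exact hheap1 i j hc hj hai (by have := childOf_lt hc; omega)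
        · have hik : i ≠ k := by rintro rfl; rw [anc_self] at hai; exact hai rfl
          have haj : anc k j = false := by
            have hjk : k < j := by have := childOf_lt hc; omega
            rw [anc_step hjk, ← childOf_eq_parent hc]
            exact Bool.not_eq_true _ ▸ (by simpa using hai)
          rw [houtside i (by simpa using hai), houtside j haj]
          exact H i j hc hj (by omega)
      obtain ⟨hperm2, hish2⟩ := ih (pysiftup h k) (by omega) H'
      exact ⟨hperm2.trans hperm1, hish2⟩
    · intro i j hc hj hai hik
      have hki : k < i := by
        have := anc_le hai
        omega
      exact H i j hc hj (by omega)

theorem pyheapify_spec (l : List Int) : Ish (pyheapify l) ∧ (pyheapify l).Perm l := by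
  unfold pyheapify
  have := heapify_aux (l.length / 2) l (by omega) ?_
  · exact ⟨this.2, this.1⟩
  · intro i j hc hj hki
    unfold ChildOf at hc
    omega

-- ---------- B-side: insort keeps the list sorted ----------

theorem insortB_spec (s : List Int) (v : Int) (hs : s.Pairwise (· ≤ ·)) :
    (insortB s v).Pairwise (· ≤ ·) ∧ (insortB s v).Perm (v :: s) := by
  obtain ⟨hple, hbefore, hafter⟩ := PySem.List.bisectRight_spec s v hs
  set p := PySem.List.bisectRight s v with hp
  have hins : insortB s v = s.take p ++ v :: s.drop p := by
    unfold insortB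
    exact PySem.List.insert_natCast s p v hple
  constructor
  · rw [hins]
    rw [List.pairwise_append]
    refine ⟨hs.sublist (List.take_sublist _ _), ?_, ?_⟩
    · rw [List.pairwise_cons]
      refine ⟨?_, hs.sublist (List.drop_sublist _ _)⟩
      intro y hy
      obtain ⟨i, hi, rfl⟩ := List.getElem_of_mem hy
      rw [List.getElem_drop]
      exact le_of_lt (hafter (p + i) (by simp at hi; omega) (by omega))
    · intro y hy b hb
      obtain ⟨i, hi, rfl⟩ := List.getElem_of_mem hy
      rw [List.getElem_take]
      have hilt : i < p := by simp at hi; omega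
      have hile : i < s.length := by simp at hi; omega
      have hyv : s[i] ≤ v := hbefore i hile hilt
      rcases List.mem_cons.mp hb with rfl | hb'
      · exact hyv
      · obtain ⟨j, hj, rfl⟩ := List.getElem_of_mem hb'
        rw [List.getElem_drop]
        refine le_trans hyv (le_of_lt (hafter (p + j) (by simp at hj; omega) (by omega)))
  · rw [hins]
    refine (List.perm_middle).trans ?_
    rw [List.take_append_drop]

-- ---------- the joint simulation of the two loops ----------

theorem head_eq_min {h sl : List Int} {h0 a : Int} {ht st : List Int}
    (hh : Ish h) (hsl : sl.Pairwise (· ≤ ·)) (hp : h.Perm sl)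
    (he : h = h0 :: ht) (hse : sl = a :: st) : h0 = a := by
  have h0m : h0 ∈ sl := hp.subset (by simp [he])
  have ham : a ∈ h := hp.symm.subset (by simp [hse])
  have h1 : hget h 0 ≤ a := root_min_mem hh a ham
  have h2 : a ≤ h0 := by
    rw [hse] at h0m hsl
    rcases List.mem_cons.mp h0m with h | h
    · omega
    · exact (List.pairwise_cons.mp hsl).1 _ h
  have : hget h 0 = h0 := by simp [he, hget]
  omega

theorem loop_sim : ∀ (n : Nat) (h sl : List Int) (K ans : Int),
    h.length ≤ n → Ish h → sl.Pairwise (· ≤ ·) → h.Perm sl →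
    (h.length = 1 → K ≤ hget h 0) →
    loopA n h K ans = loopB n sl K ans := by
  intro n
  induction n with
  | zero =>
    intro h sl K ans hn _ _ hperm _
    have h0 : h = [] := List.eq_nil_of_length_eq_zero (by omega)
    subst h0
    have hsl : sl = [] := List.perm_nil.mp hperm.symm
    subst hsl
    rfl
  | succ n ih =>
    intro h sl K ans hn hish hsorted hperm hone
    cases h with
    | nil =>
      have hsl : sl = [] := List.perm_nil.mp hperm.symm
      subst hsl
      rfl
    | cons a0 ht =>
      cases sl with
      | nil => exact absurd (List.perm_nil.mp hperm) (by simp)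
      | cons a st =>
        have hhead : a0 = a := head_eq_min hish hsorted hperm rfl rfl
        subst hhead
        by_cases hK : a0 < K
        · -- both sides iterate
          have hne : (a0 :: ht) ≠ [] := by simp
          obtain ⟨h1, hpop1, hish1, hperm1⟩ := pyheappop_spec (a0 :: ht) hish hne
          have hget0 : hget (a0 :: ht) 0 = a0 := by simp [hget]
          rw [hget0] at hpop1
          have hlen_ne1 : (a0 :: ht).length ≠ 1 := by
            intro h1len
            have := hone h1len
            rw [hget0] at this
            omega
          have hlen_eq := hperm.length_eq
          cases st with
          | nil =>
            exfalso
            apply hlen_ne1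
            simpa using hlen_eq
          | cons b rest =>
            have hpermt : ht.Perm (b :: rest) := hperm.cons_inv
            have hperm1' : h1.Perm (b :: rest) := by
              refine List.Perm.trans ?_ hpermt
              simpa using hperm1
            have h1ne : h1 ≠ [] := by
              intro hc
              rw [hc] at hperm1'
              have := hperm1'.length_eq
              simp at this
            obtain ⟨h2, hpop2, hish2, hperm2⟩ := pyheappop_spec h1 hish1 h1ne
            have hsorted_t : (b :: rest).Pairwise (· ≤ ·) := (List.pairwise_cons.mp hsorted).2
            obtain ⟨h10, h1t, h1eq⟩ : ∃ y t, h1 = y :: t := by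
              cases h1 with
              | nil => exact absurd rfl h1ne
              | cons y t => exact ⟨y, t, rfl⟩
            have hb0 : h10 = b := head_eq_min hish1 hsorted_t hperm1' h1eq rfl
            have hb : hget h1 0 = b := by rw [h1eq, hb0]; simp [hget]
            rw [hb] at hpop2
            obtain ⟨hish3, hperm3⟩ := pyheappush_spec h2 (a0 + b * 2) hish2
            have hpermh2 : h2.Perm rest := by
              have ht1 : h1.tail = h1t := by rw [h1eq]; rfl
              have h1t_perm : h1t.Perm rest := by
                have hx := hperm1'
                rw [h1eq, hb0] at hx
                exact hx.cons_inv
              rw [ht1] at hperm2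
              exact hperm2.trans h1t_perm
            have hperm3' : (pyheappush h2 (a0 + b * 2)).Perm ((a0 + b * 2) :: rest) :=
              hperm3.trans (hpermh2.cons _)
            obtain ⟨hsortB, hpermB⟩ :=
              insortB_spec rest (a0 + b * 2) ((List.pairwise_cons.mp hsorted_t).2)
            have hpermAB : (pyheappush h2 (a0 + b * 2)).Perm (insortB rest (a0 + b * 2)) :=
              hperm3'.trans hpermB.symm
            have hlen3 : (pyheappush h2 (a0 + b * 2)).length = ht.length := by
              have e1 := pyheappush_length h2 (a0 + b * 2)
              have e2 := pyheappop_length _ _ hpop2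
              have e3 := pyheappop_length _ _ hpop1
              simp only [List.length_cons] at e2 e3
              omega
            -- reduce the B side one step
            have hBstep : loopB (n + 1) (a0 :: b :: rest) K ans =
                loopB n (insortB rest (a0 + b * 2)) K (ans + 1) := by
              rw [loopB]
              simp [hK, hlen_ne1]
            rw [hBstep]
            -- reduce the A side one step
            rw [loopA]
            simp only [if_pos hK]
            split
            · rename_i heq1
              rw [hpop1] at heq1
              cases heq1
            · rename_i a' h1' heq1
              rw [hpop1] at heq1
              injection heq1 with heq1'
              injection heq1' with ha1 hh1
              subst ha1
              subst hh1
              split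
              · rename_i heq2
                rw [hpop2] at heq2
                cases heq2
              · rename_i b' h2' heq2
                rw [hpop2] at heq2
                injection heq2 with heq2'
                injection heq2' with hb1 hh2
                subst hb1
                subst hh2
                split
                · rename_i heq3
                  have := pyheappush_length h2 (a0 + b * 2)
                  rw [heq3] at this
                  simp at this
                · rename_i g0 gt heq3
                  rw [heq3]
                  by_cases hguard : g0 < K ∧ (g0 :: gt).length = 1
                  · rw [if_pos (by simpa using hguard)]
                    -- the freshly pushed heap is the singleton [g0]
                    have hgt : gt = [] := by
                      have := hguard.2
                      simp at this
                      exact this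
                    subst hgt
                    have hperm_s : ((a0 + b * 2) :: rest).Perm [g0] := by
                      rw [← heq3]
                      exact hperm3'.symm
                    have hrest : rest = [] := by
                      have := hperm_s.length_eq
                      simp at this
                      exact this
                    subst hrest
                    have hnum : a0 + b * 2 = g0 := by
                      have := List.perm_singleton.mp hperm_s
                      injection this
                    have hinsort : insortB [] (a0 + b * 2) = [a0 + b * 2] := by
                      have := List.perm_singleton.mp (hpermB.trans (List.Perm.refl _))
                      simpa using this
                    obtain ⟨m, rfl⟩ : ∃ m, n = m + 1 := by
                      refine ⟨n - 1, ?_⟩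
                      have hhtlen := hpermt.length_eq
                      simp only [List.length_cons] at hhtlen hn
                      omega
                    rw [hinsort, loopB]
                    rw [if_pos (by omega : a0 + b * 2 < K)]
                    simp
                  · rw [if_neg (by simpa using hguard)]
                    -- both loops continue; apply the induction hypothesis
                    have hlen3' : (g0 :: gt).length = ht.length := by rw [← heq3]; exact hlen3
                    have hone' : (g0 :: gt).length = 1 → K ≤ hget (g0 :: gt) 0 := by
                      intro hl1
                      have hg0 : hget (g0 :: gt) 0 = g0 := by simp [hget]
                      rw [hg0]
                      by_contra hcon
                      exact hguard ⟨by omega, hl1⟩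
                    refine ih (g0 :: gt) (insortB rest (a0 + b * 2)) K (ans + 1) ?_
                      (heq3 ▸ hish3) hsortB (heq3 ▸ hpermAB) hone'
                    have : ht.length + 1 ≤ n + 1 := by simpa using hn
                    omega
        · -- both sides stop and return ans
          rw [loopA.eq_def, loopB.eq_def]
          simp [hK]

-- ===== VERDICT (by name: the statement is the Claim_ definition above) =====
theorem solution_spec : Claim_equal_solution := by
  intro scoville K hdom hpre
  unfold Spec_solution solution solution_alt
  obtain ⟨hish, hperm⟩ := pyheapify_spec scoville
  have hsp := PySem.List.sorted_pairwise scoville (fun x => x)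
  have hsperm : (pyheapify scoville).Perm (PySem.List.sorted scoville (fun x => x) false) :=
    hperm.trans (PySem.List.sorted_perm scoville (fun x => x) false).symm
  have hone : (pyheapify scoville).length = 1 → K ≤ hget (pyheapify scoville) 0 := by
    intro h1
    have : scoville.length = 1 := by
      have := hperm.length_eq; omega
    obtain ⟨y, hy⟩ : ∃ y, scoville = [y] := by
      cases scoville with
      | nil => simp at this
      | cons a t => cases t with
        | nil => exact ⟨a, rfl⟩
        | cons b u => simp at this
    have hk := hpre.2 this
    have : pyheapify scoville = [y] := by
      refine List.perm_singleton.mp ?_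
      rw [← hy]; exact hperm
    rw [this]
    simpa [hy, hget] using hk
  have hfe : (PySem.List.sorted scoville (fun x => x) false).length =
      (pyheapify scoville).length := by
    rw [PySem.List.length_sorted]
    exact hperm.length_eq.symm
  rw [hfe]
  rw [loop_sim (pyheapify scoville).length _ _ K 0 (le_refl _) hish
    (by simpa using hsp) hsperm hone]

@[simp] theorem solution_raises : Claim_raises_solution := by
  unfold Claim_raises_solution
  constructor
  · intro scoville K _ hr hpre
    have := hpre.2 hr.1
    have := hr.2
    omega
  · exact ⟨by decide, by decide, by decide⟩
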